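-- pv_equiv track=rewrite | github.com/Kuhron/programming | SwampEcologyGame.py | get_badness_of_precedence
-- ===== SOURCE A (Python) =====
-- def eats(animal_i, animal_j, precedences):
--     assert animal_i != animal_j, "don't check for equal animals"
--     prec = precedences[animal_i][animal_j]
--     return prec == ">"  # if i > j, i is greater than j, i eats j
--
-- def get_badness_of_precedence(ai, aj, precedences, cards_held, cards_available_for_opponent):
--     assert ai != aj
--     my_cards_that_win = 0
--     my_cards_that_lose = 0
--     their_cards_that_win = 0
--     their_cards_that_lose = 0
--
--     for ch in cards_held:
--         for co in cards_available_for_opponent: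
--             should_count = {ch, co} == {ai, aj}  # only care about how this particular pair of animals interacts
--             if not should_count:
--                 continue
--             if eats(ch, co, precedences):
--                 my_cards_that_win += 1
--                 their_cards_that_lose += 1
--             else:
--                 my_cards_that_lose += 1
--                 their_cards_that_win += 1
--                 # I guess we're always double counting by counting both my and their cards but whatever
--     return (my_cards_that_lose + their_cards_that_win) - (my_cards_that_win + their_cards_that_lose)
-- ===== SOURCE B (Python) =====
-- def get_badness_of_precedence(ai, aj, precedences, cards_held, cards_available_for_opponent):
--     assert ai != aj
--     # closed form: only the (ai,aj) and (aj,ai) pairings ever count, so count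
--     # the cards once instead of scanning every pair
--     n_ij = cards_held.count(ai) * cards_available_for_opponent.count(aj)
--     n_ji = cards_held.count(aj) * cards_available_for_opponent.count(ai)
--     badness = 0
--     if n_ij > 0:
--         badness += 2 * n_ij * (-1 if precedences[ai][aj] == ">" else 1)
--     if n_ji > 0:
--         badness += 2 * n_ji * (-1 if precedences[aj][ai] == ">" else 1)
--     return badness
-- ===== Notes on version B (the rewrite author's own statement) =====
-- stated objective: faster
-- what changed: Replaces the nested scan over all (held, opponent) card pairs by counting occurrences of ai and aj in each list once and combining the four counts with the two fixed precedence lookups in a closed form.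
import Mathlib
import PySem

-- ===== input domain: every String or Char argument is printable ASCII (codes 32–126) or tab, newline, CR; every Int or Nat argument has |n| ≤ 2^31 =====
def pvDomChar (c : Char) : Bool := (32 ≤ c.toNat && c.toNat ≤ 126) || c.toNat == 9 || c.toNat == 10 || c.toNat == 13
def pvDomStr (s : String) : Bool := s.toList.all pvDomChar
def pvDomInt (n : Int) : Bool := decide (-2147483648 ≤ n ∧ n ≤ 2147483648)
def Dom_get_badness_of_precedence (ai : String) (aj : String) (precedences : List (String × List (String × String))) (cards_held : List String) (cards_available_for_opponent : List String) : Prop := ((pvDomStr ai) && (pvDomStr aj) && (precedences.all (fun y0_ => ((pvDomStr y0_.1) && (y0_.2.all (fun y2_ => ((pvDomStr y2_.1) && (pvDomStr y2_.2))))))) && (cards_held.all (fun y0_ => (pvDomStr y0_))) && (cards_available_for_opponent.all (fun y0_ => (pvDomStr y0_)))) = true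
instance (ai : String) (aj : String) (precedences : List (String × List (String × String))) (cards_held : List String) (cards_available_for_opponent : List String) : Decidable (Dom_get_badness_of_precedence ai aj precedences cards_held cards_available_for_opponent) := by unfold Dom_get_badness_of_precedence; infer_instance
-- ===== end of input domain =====

-- B replaces A's O(n*m) scan of all card pairs by counting ai/aj occurrences once and
-- combining the counts with the two fixed precedence lookups (closed form; asymptotically faster).

-- ===== PORT A =====
-- dict[x][y] lookup, shared by both ports (none = KeyError; Pre_ excludes the reached KeyErrors)
def pvPrec? (precedences : List (String × List (String × String))) (x y : String) : Option String :=
  ((PySem.Dict.mk precedences).get? x).bind (fun d => (PySem.Dict.mk d).get? y)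

-- eats(animal_i, animal_j, precedences); the assert animal_i ≠ animal_j never fires on the
-- calls A makes under Pre_ (ai ≠ aj), and the KeyError case (pvPrec? = none) is outside Pre_
def pvEats (animal_i animal_j : String) (precedences : List (String × List (String × String))) : Bool :=
  pvPrec? precedences animal_i animal_j == some ">"

def get_badness_of_precedence (ai : String) (aj : String) (precedences : List (String × List (String × String))) (cards_held : List String) (cards_available_for_opponent : List String) : Int :=
  -- state = (my_cards_that_win, my_cards_that_lose, their_cards_that_win, their_cards_that_lose)
  let s := cards_held.foldl (fun s ch =>
    cards_available_for_opponent.foldl (fun s co =>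
      let should_count := PySem.Set.equal (PySem.Set.ofList [ch, co]) (PySem.Set.ofList [ai, aj])
      if !should_count then s
      else if pvEats ch co precedences then (s.1 + 1, s.2.1, s.2.2.1, s.2.2.2 + 1)
      else (s.1, s.2.1 + 1, s.2.2.1 + 1, s.2.2.2)) s)
    ((0, 0, 0, 0) : Int × Int × Int × Int)
  (s.2.1 + s.2.2.1) - (s.1 + s.2.2.2)

-- ===== PORT B =====
def get_badness_of_precedence_alt (ai : String) (aj : String) (precedences : List (String × List (String × String))) (cards_held : List String) (cards_available_for_opponent : List String) : Int :=
  let n_ij : Int := (cards_held.count ai : Int) * (cards_available_for_opponent.count aj : Int)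
  let n_ji : Int := (cards_held.count aj : Int) * (cards_available_for_opponent.count ai : Int)
  let b1 : Int := if n_ij > 0 then 2 * n_ij * (if pvPrec? precedences ai aj == some ">" then -1 else 1) else 0
  let b2 : Int := if n_ji > 0 then 2 * n_ji * (if pvPrec? precedences aj ai == some ">" then -1 else 1) else 0
  b1 + b2

-- ===== PRECONDITION & SPEC =====
-- Pre_ excludes exactly the inputs where the Python A raises: ai = aj (AssertionError), and a
-- reachable missing precedences[x][y] entry (KeyError, reached iff the corresponding pair of
-- cards actually occurs, i.e. the count product is nonzero).
def Pre_get_badness_of_precedence (ai : String) (aj : String) (precedences : List (String × List (String × String))) (cards_held : List String) (cards_available_for_opponent : List String) : Prop :=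
  ai ≠ aj ∧
  (cards_held.count ai * cards_available_for_opponent.count aj = 0 ∨ (pvPrec? precedences ai aj).isSome) ∧
  (cards_held.count aj * cards_available_for_opponent.count ai = 0 ∨ (pvPrec? precedences aj ai).isSome)
instance (ai : String) (aj : String) (precedences : List (String × List (String × String))) (cards_held : List String) (cards_available_for_opponent : List String) : Decidable (Pre_get_badness_of_precedence ai aj precedences cards_held cards_available_for_opponent) := by unfold Pre_get_badness_of_precedence; infer_instance

def pvWitness_get_badness_of_precedence : String × String × (List (String × List (String × String))) × List String × List String :=
  ("fox", "hen", [("fox", [("hen", ">")]), ("hen", [("fox", "<")])], ["fox", "hen"], ["hen"])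

def Spec_get_badness_of_precedence (ai : String) (aj : String) (precedences : List (String × List (String × String))) (cards_held : List String) (cards_available_for_opponent : List String) (out : Int) : Prop := out = get_badness_of_precedence_alt ai aj precedences cards_held cards_available_for_opponent
instance (ai : String) (aj : String) (precedences : List (String × List (String × String))) (cards_held : List String) (cards_available_for_opponent : List String) (out : Int) : Decidable (Spec_get_badness_of_precedence ai aj precedences cards_held cards_available_for_opponent out) := by unfold Spec_get_badness_of_precedence; infer_instance

-- ===== CLAIM (what is proved, stated in full; the proofs are below) =====
def Claim_equal_get_badness_of_precedence : Prop := ∀ (ai : String) (aj : String) (precedences : List (String × List (String × String))) (cards_held : List String) (cards_available_for_opponent : List String), Dom_get_badness_of_precedence ai aj precedences cards_held cards_available_for_opponent → Pre_get_badness_of_precedence ai aj precedences cards_held cards_available_for_opponent → Spec_get_badness_of_precedence ai aj precedences cards_held cards_available_for_opponent (get_badness_of_precedence ai aj precedences cards_held cards_available_for_opponent)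

-- ===== LEMMAS AND PROOFS =====

-- per-pair win/lose contribution of A's inner-loop body
def pvWUnit (ai aj : String) (precedences : List (String × List (String × String))) (ch co : String) : Int :=
  if PySem.Set.equal (PySem.Set.ofList [ch, co]) (PySem.Set.ofList [ai, aj]) then
    (if pvEats ch co precedences then 1 else 0) else 0
def pvLUnit (ai aj : String) (precedences : List (String × List (String × String))) (ch co : String) : Int :=
  if PySem.Set.equal (PySem.Set.ofList [ch, co]) (PySem.Set.ofList [ai, aj]) then
    (if pvEats ch co precedences then 0 else 1) else 0

lemma pv_set_pair_eq (ai aj ch co : String) (hne : ai ≠ aj) :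
    PySem.Set.equal (PySem.Set.ofList [ch, co]) (PySem.Set.ofList [ai, aj]) = true ↔
    ((ch = ai ∧ co = aj) ∨ (ch = aj ∧ co = ai)) := by
  rw [PySem.Set.equal_iff]
  constructor
  · intro h
    have h' : ∀ x : String, (x = ch ∨ x = co) ↔ (x = ai ∨ x = aj) := by
      intro x
      have := h x
      simpa [PySem.Set.mem_ofList, List.mem_cons] using this
    have hch := (h' ch).mp (Or.inl rfl)
    have hco := (h' co).mp (Or.inr rfl)
    have hai := (h' ai).mpr (Or.inl rfl)
    have haj := (h' aj).mpr (Or.inr rfl)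
    rcases hch with h1 | h1 <;> rcases hco with h2 | h2
    · rcases haj with h3 | h3
      · exact absurd (h1.symm.trans h3.symm) hne
      · exact absurd (h2.symm.trans h3.symm) hne
    · exact Or.inl ⟨h1, h2⟩
    · exact Or.inr ⟨h1, h2⟩
    · rcases hai with h3 | h3
      · exact absurd (h3.trans h1) hne
      · exact absurd (h3.trans h2) hne
  · rintro (⟨h1, h2⟩ | ⟨h1, h2⟩) x <;> subst h1 <;> subst h2 <;>
      simp [PySem.Set.mem_ofList, List.mem_cons] <;> tauto

lemma pv_set_pair_eq_bool (ai aj ch co : String) (hne : ai ≠ aj) :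
    PySem.Set.equal (PySem.Set.ofList [ch, co]) (PySem.Set.ofList [ai, aj]) =
    ((decide (ch = ai) && decide (co = aj)) || (decide (ch = aj) && decide (co = ai))) := by
  rw [Bool.eq_iff_iff, pv_set_pair_eq ai aj ch co hne]
  simp

lemma pv_inner_fold (ai aj : String) (precedences : List (String × List (String × String)))
    (ch : String) (l : List String) :
    ∀ (s : Int × Int × Int × Int),
    l.foldl (fun s co =>
      let should_count := PySem.Set.equal (PySem.Set.ofList [ch, co]) (PySem.Set.ofList [ai, aj])
      if !should_count then s
      else if pvEats ch co precedences then (s.1 + 1, s.2.1, s.2.2.1, s.2.2.2 + 1)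
      else (s.1, s.2.1 + 1, s.2.2.1 + 1, s.2.2.2)) s =
    (s.1 + (l.map (pvWUnit ai aj precedences ch)).sum,
     s.2.1 + (l.map (pvLUnit ai aj precedences ch)).sum,
     s.2.2.1 + (l.map (pvLUnit ai aj precedences ch)).sum,
     s.2.2.2 + (l.map (pvWUnit ai aj precedences ch)).sum) := by
  induction l with
  | nil => intro s; simp
  | cons co l ih =>
    intro s
    simp only [List.foldl_cons, List.map_cons, List.sum_cons, ih]
    unfold pvWUnit pvLUnit
    by_cases hc : PySem.Set.equal (PySem.Set.ofList [ch, co]) (PySem.Set.ofList [ai, aj]) = true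
    · by_cases he : pvEats ch co precedences = true <;>
        simp only [hc, he, Bool.not_true, if_true, if_false, Bool.false_eq_true,
          Bool.not_false, ite_true, ite_false, Prod.ext_iff] <;> omega
    · simp only [Bool.not_eq_true] at hc
      simp only [hc, Bool.not_false, if_true, Bool.false_eq_true, if_false, Prod.ext_iff]
      omega

def pvW (ai aj : String) (precedences : List (String × List (String × String)))
    (opp : List String) (ch : String) : Int := (opp.map (pvWUnit ai aj precedences ch)).sum
def pvL (ai aj : String) (precedences : List (String × List (String × String)))
    (opp : List String) (ch : String) : Int := (opp.map (pvLUnit ai aj precedences ch)).sum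

lemma pv_outer_fold (ai aj : String) (precedences : List (String × List (String × String)))
    (opp : List String) (held : List String) :
    ∀ (s : Int × Int × Int × Int),
    held.foldl (fun s ch =>
      opp.foldl (fun s co =>
        let should_count := PySem.Set.equal (PySem.Set.ofList [ch, co]) (PySem.Set.ofList [ai, aj])
        if !should_count then s
        else if pvEats ch co precedences then (s.1 + 1, s.2.1, s.2.2.1, s.2.2.2 + 1)
        else (s.1, s.2.1 + 1, s.2.2.1 + 1, s.2.2.2)) s) s =
    (s.1 + (held.map (pvW ai aj precedences opp)).sum,
     s.2.1 + (held.map (pvL ai aj precedences opp)).sum,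
     s.2.2.1 + (held.map (pvL ai aj precedences opp)).sum,
     s.2.2.2 + (held.map (pvW ai aj precedences opp)).sum) := by
  induction held with
  | nil => intro s; simp
  | cons ch held ih =>
    intro s
    simp only [List.foldl_cons, List.map_cons, List.sum_cons, ih,
      pv_inner_fold ai aj precedences ch opp s]
    simp only [pvW, pvL, Prod.ext_iff]
    omega

-- sum over l of (if x = t then C else 0)  =  count t * C
lemma pv_sum_one_count (t : String) (C : Int) (l : List String) :
    (l.map (fun x => if x = t then C else 0)).sum = (l.count t : Int) * C := by
  induction l with
  | nil => simp
  | cons x l ih =>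
    simp only [List.map_cons, List.sum_cons, ih, List.count_cons]
    push_cast
    by_cases h : x = t
    · simp [h, beq_iff_eq]
      try ring
    · simp [h, beq_iff_eq, Ne.symm h]
      try ring

-- sum over l of (if x = a then X else if x = b then Y else 0)  =  count a * X + count b * Y
lemma pv_sum_two_counts (a b : String) (X Y : Int) (hab : a ≠ b) (l : List String) :
    (l.map (fun x => if x = a then X else if x = b then Y else 0)).sum =
    (l.count a : Int) * X + (l.count b : Int) * Y := by
  induction l with
  | nil => simp
  | cons x l ih =>
    simp only [List.map_cons, List.sum_cons, ih, List.count_cons]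
    push_cast
    by_cases h1 : x = a
    · simp [beq_iff_eq, h1, hab, Ne.symm hab]
      try ring
    · by_cases h2 : x = b
      · simp [beq_iff_eq, h1, h2, Ne.symm hab, Ne.symm h1]
        try ring
      · simp [beq_iff_eq, h1, h2, Ne.symm h1, Ne.symm h2]
        try ring

lemma pv_W_char (ai aj ch : String) (precedences : List (String × List (String × String)))
    (opp : List String) (hne : ai ≠ aj) :
    pvW ai aj precedences opp ch =
      if ch = ai then (if pvEats ai aj precedences then (opp.count aj : Int) else 0)
      else if ch = aj then (if pvEats aj ai precedences then (opp.count ai : Int) else 0)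
      else 0 := by
  simp only [pvW]
  by_cases h1 : ch = ai
  · have hmap : ∀ co, pvWUnit ai aj precedences ch co =
        if co = aj then (if pvEats ai aj precedences then 1 else 0) else 0 := by
      intro co
      simp only [pvWUnit, pv_set_pair_eq_bool ai aj ch co hne]
      by_cases h3 : co = aj <;> simp [h1, h3, hne]
    rw [List.map_congr_left (fun co _ => hmap co), pv_sum_one_count]
    by_cases he : pvEats ai aj precedences = true <;> simp [h1, he, hne]
  · by_cases h2 : ch = aj
    · have hmap : ∀ co, pvWUnit ai aj precedences ch co =
          if co = ai then (if pvEats aj ai precedences then 1 else 0) else 0 := by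
        intro co
        simp only [pvWUnit, pv_set_pair_eq_bool ai aj ch co hne]
        by_cases h3 : co = ai <;> simp [h1, h2, h3, Ne.symm hne]
      rw [List.map_congr_left (fun co _ => hmap co), pv_sum_one_count]
      by_cases he : pvEats aj ai precedences = true <;> simp [h1, h2, he, Ne.symm hne]
    · have hmap : ∀ co, pvWUnit ai aj precedences ch co = 0 := by
        intro co
        simp only [pvWUnit, pv_set_pair_eq_bool ai aj ch co hne]
        simp [h1, h2]
      rw [List.map_congr_left (fun co _ => hmap co)]
      simp [h1, h2]

lemma pv_L_char (ai aj ch : String) (precedences : List (String × List (String × String)))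
    (opp : List String) (hne : ai ≠ aj) :
    pvL ai aj precedences opp ch =
      if ch = ai then (if pvEats ai aj precedences then 0 else (opp.count aj : Int))
      else if ch = aj then (if pvEats aj ai precedences then 0 else (opp.count ai : Int))
      else 0 := by
  simp only [pvL]
  by_cases h1 : ch = ai
  · have hmap : ∀ co, pvLUnit ai aj precedences ch co =
        if co = aj then (if pvEats ai aj precedences then 0 else 1) else 0 := by
      intro co
      simp only [pvLUnit, pv_set_pair_eq_bool ai aj ch co hne]
      by_cases h3 : co = aj <;> simp [h1, h3, hne]
    rw [List.map_congr_left (fun co _ => hmap co), pv_sum_one_count]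
    by_cases he : pvEats ai aj precedences = true <;> simp [h1, he, hne]
  · by_cases h2 : ch = aj
    · have hmap : ∀ co, pvLUnit ai aj precedences ch co =
          if co = ai then (if pvEats aj ai precedences then 0 else 1) else 0 := by
        intro co
        simp only [pvLUnit, pv_set_pair_eq_bool ai aj ch co hne]
        by_cases h3 : co = ai <;> simp [h1, h2, h3, Ne.symm hne]
      rw [List.map_congr_left (fun co _ => hmap co), pv_sum_one_count]
      by_cases he : pvEats aj ai precedences = true <;> simp [h1, h2, he, Ne.symm hne]
    · have hmap : ∀ co, pvLUnit ai aj precedences ch co = 0 := by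
        intro co
        simp only [pvLUnit, pv_set_pair_eq_bool ai aj ch co hne]
        simp [h1, h2]
      rw [List.map_congr_left (fun co _ => hmap co)]
      simp [h1, h2]

-- ===== VERDICT (by name: the statement is the Claim_ definition above) =====
theorem get_badness_of_precedence_spec : Claim_equal_get_badness_of_precedence := by
  intro ai aj precedences held opp _hdom hpre
  obtain ⟨hne, _, _⟩ := hpre
  unfold Spec_get_badness_of_precedence get_badness_of_precedence get_badness_of_precedence_alt
  rw [pv_outer_fold ai aj precedences opp held ((0, 0, 0, 0) : Int × Int × Int × Int)]
  have hW : (held.map (pvW ai aj precedences opp)).sum =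
      (held.count ai : Int) * (if pvEats ai aj precedences then (opp.count aj : Int) else 0)
      + (held.count aj : Int) * (if pvEats aj ai precedences then (opp.count ai : Int) else 0) := by
    rw [List.map_congr_left (fun ch _ => pv_W_char ai aj ch precedences opp hne),
      pv_sum_two_counts _ _ _ _ hne]
  have hL : (held.map (pvL ai aj precedences opp)).sum =
      (held.count ai : Int) * (if pvEats ai aj precedences then 0 else (opp.count aj : Int))
      + (held.count aj : Int) * (if pvEats aj ai precedences then 0 else (opp.count ai : Int)) := by
    rw [List.map_congr_left (fun ch _ => pv_L_char ai aj ch precedences opp hne),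
      pv_sum_two_counts _ _ _ _ hne]
  simp only [hW, hL, pvEats]
  have hx0 : (0 : Int) ≤ (held.count ai : Int) * (opp.count aj : Int) := by positivity
  have hy0 : (0 : Int) ≤ (held.count aj : Int) * (opp.count ai : Int) := by positivity
  by_cases e1 : (pvPrec? precedences ai aj == some ">") = true <;>
    by_cases e2 : (pvPrec? precedences aj ai == some ">") = true <;>
      simp only [e1, e2, if_true, Bool.false_eq_true, if_false, ite_true, ite_false,
        Bool.not_eq_true] <;>
      (try simp only [Bool.not_eq_true] at e1 e2) <;>
      set x : Int := (held.count ai : Int) * (opp.count aj : Int) with hx <;>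
      set y : Int := (held.count aj : Int) * (opp.count ai : Int) with hy <;>
      split_ifs <;> omega
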